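-- pv_equiv track=rewrite | github.com/hallov012/Algo_hallov | 2024.03/PRO_도넛과막대그래프/s2.py | solution
-- ===== SOURCE A (Python) =====
-- from collections import defaultdict, deque
--
-- def solution(edges):
--     answer = [0, 0, 0, 0]
--     out_g = defaultdict(int)
--     in_g = defaultdict(int)
--     g = defaultdict(list)
--     nodes = set()
--     for a, b in edges:
--         out_g[a] += 1
--         in_g[b] += 1
--         nodes.add(a)
--         nodes.add(b)
--         g[a].append(b)
--
--     for x in nodes:
--         # 나가는 것만 있으면 정점
--         if not in_g[x] and out_g[x] >= 2:
--             answer[0] = x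
--             node = x
--
--     m = 1000000
--     visited = [0] * (m + 1)
--     for x in g[node]:
--         visited[x] = 1
--         cnt = 1
--         edges = 0
--         que = deque([x])
--         dup = False
--         while que:
--             a = que.popleft()
--             for b in g[a]:
--                 if b != node:
--                     edges += 1
--                     if not visited[b]:
--                         visited[b] = 1
--                         que.append(b)
--                         cnt += 1
--                     else:
--                         dup = True
--         if not dup:
--             answer[2] += 1
--         else:
--             if cnt == edges:
--                 answer[1] += 1
--             elif cnt + 1 == edges:
--                 answer[3] += 1
--
--     return answer
-- ===== SOURCE B (Python) =====
-- def solution(edges):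
--     outdeg = {}
--     indeg = {}
--     for a, b in edges:
--         outdeg[a] = outdeg.get(a, 0) + 1
--         indeg[b] = indeg.get(b, 0) + 1
--     cands = [v for v, o in outdeg.items() if o >= 2 and indeg.get(v, 0) == 0]
--     gen = cands[-1]
--     donut = stick = eight = 0
--     seen = set()
--     for x in [b for a, b in edges if a == gen]:
--         seen.add(x)
--         comp = {x}
--         changed = True
--         while changed:
--             changed = False
--             for a, b in edges:
--                 if a in comp and b != gen and b not in seen:
--                     seen.add(b)
--                     comp.add(b)
--                     changed = True
--         n = len(comp)
--         e = sum(1 for a, b in edges if a in comp and b != gen)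
--         d = e - n + 1
--         if d == 0:
--             stick += 1
--         elif d == 1:
--             donut += 1
--         elif d == 2:
--             eight += 1
--     return [gen, donut, stick, eight]
-- ===== Notes on version B (the rewrite author's own statement) =====
-- stated objective: alternative
-- what changed: B drops A's BFS entirely (no adjacency dictionary for traversal, no deque, no 10^6-entry visited array, no per-edge cnt/edges/dup bookkeeping): it computes each component as a fixpoint by repeatedly relaxing the raw edge list (add b whenever a is already in the component) and classifies the component arithmetically by e - n + 1 (0 = stick, 1 = donut, 2 = figure-8) from degree counts.
-- outside the precondition, e.g. on solution([(4, 5), (4, 6), (1, 2), (1, 3)]): A returns [4, 0, 2, 0], B returns [1, 0, 2, 0]; on solution([(1, 2), (1, 3), (2, 4), (3, -999997)]): A returns [1, 1, 1, 0], B returns [1, 0, 2, 0]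
import Mathlib
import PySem

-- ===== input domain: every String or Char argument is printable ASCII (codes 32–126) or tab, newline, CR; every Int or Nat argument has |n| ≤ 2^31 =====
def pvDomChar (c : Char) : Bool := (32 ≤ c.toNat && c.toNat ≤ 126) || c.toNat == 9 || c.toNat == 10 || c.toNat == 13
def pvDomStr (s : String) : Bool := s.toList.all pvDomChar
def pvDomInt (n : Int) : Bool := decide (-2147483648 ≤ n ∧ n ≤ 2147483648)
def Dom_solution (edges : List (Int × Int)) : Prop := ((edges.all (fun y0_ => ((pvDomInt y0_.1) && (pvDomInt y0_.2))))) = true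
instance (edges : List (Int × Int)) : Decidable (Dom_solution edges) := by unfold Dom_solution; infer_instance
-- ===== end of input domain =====

-- B replaces A's queue-driven BFS over an adjacency dictionary (and its fixed 10^6-entry visited
-- array) by a fixpoint relaxation that repeatedly scans the raw edge list until no new vertex is
-- added, then classifies each component arithmetically by e - n + 1.
-- (A mutates nothing observable; equivalence is about the return value.)

-- ===== PORT A =====

-- the vertex universe a traversal can ever add marks from (used only as a termination measure)
def pvUniv (g : PySem.Dict Int (List Int)) : Finset Int := g.values.flatten.toFinset

theorem pvMemUniv (g : PySem.Dict Int (List Int)) (a x : Int) (hx : x ∈ g.getD a []) :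
    x ∈ pvUniv g := by
  unfold pvUniv
  rcases h : g.get? a with _ | l
  · simp [PySem.Dict.getD_eq_get?_getD, h] at hx
  · have hl : l ∈ g.values := by
      have := PySem.Dict.mem_items_of_get?_eq_some (d := g) h
      simp only [PySem.Dict.values]
      exact List.mem_map_of_mem this
    have : x ∈ g.values.flatten := by
      rw [List.mem_flatten]
      refine ⟨l, hl, ?_⟩
      simpa [PySem.Dict.getD_eq_get?_getD, h] using hx
    simpa using this

theorem pvCardLt (U : Finset Int) (v new : List Int) (y : Int)
    (hy : y ∈ new) (hnv : y ∉ v) (hu : y ∈ U) :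
    (U \ (v ++ new).toFinset).card < (U \ v.toFinset).card := by
  apply Finset.card_lt_card
  constructor
  · intro z hz
    simp only [Finset.mem_sdiff, List.toFinset_append, Finset.mem_union, List.mem_toFinset] at hz ⊢
    exact ⟨hz.1, fun h => hz.2 (Or.inl (by simpa using h))⟩
  · intro hsub
    have h1 : y ∈ U \ v.toFinset := by
      simp [Finset.mem_sdiff, List.mem_toFinset, hu, hnv]
    have h2 := hsub h1
    simp [Finset.mem_sdiff, List.mem_toFinset, hy] at h2

-- inner per-edge step of A's BFS (state: visited, queue, cnt, edges, dup)
def pvStepA (node : Int) (st : PySem.Set Int × List Int × Int × Int × Bool) (b : Int) :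
    PySem.Set Int × List Int × Int × Int × Bool :=
  if b = node then st
  else if PySem.Set.contains st.1 b then
    (st.1, st.2.1, st.2.2.1, st.2.2.2.1 + 1, true)
  else
    (PySem.Set.add st.1 b, st.2.1 ++ [b], st.2.2.1 + 1, st.2.2.2.1 + 1, st.2.2.2.2)

-- shape of one pop's inner fold (cited by solutionLoopA's decreasing_by)
theorem pvInnerA_measure (node : Int) (l : List Int) :
    ∀ (v q : List Int) (c e : Int) (d : Bool), ∃ (new : List Int) (c' e' : Int) (d' : Bool),
      l.foldl (pvStepA node) (v, q, c, e, d) = (v ++ new, q ++ new, c', e', d')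
      ∧ ∀ x ∈ new, x ∉ v ∧ x ∈ l ∧ x ≠ node := by
  induction l with
  | nil => intro v q c e d; exact ⟨[], c, e, d, by simp, by simp⟩
  | cons b l ih =>
    intro v q c e d
    simp only [List.foldl_cons]
    by_cases hb : b = node
    · obtain ⟨new, c', e', d', h1, h2⟩ := ih v q c e d
      exact ⟨new, c', e', d', by simpa [pvStepA, hb] using h1,
        fun x hx => ⟨(h2 x hx).1, by simp [(h2 x hx).2.1], (h2 x hx).2.2⟩⟩
    · by_cases hv : b ∈ v
      · obtain ⟨new, c', e', d', h1, h2⟩ := ih v q c (e + 1) true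
        exact ⟨new, c', e', d', by simpa [pvStepA, hb, hv] using h1,
          fun x hx => ⟨(h2 x hx).1, by simp [(h2 x hx).2.1], (h2 x hx).2.2⟩⟩
      · obtain ⟨new, c', e', d', h1, h2⟩ := ih (v ++ [b]) (q ++ [b]) (c + 1) (e + 1) d
        refine ⟨b :: new, c', e', d', ?_, ?_⟩
        · simpa [pvStepA, hb, hv] using h1
        · intro x hx
          rcases List.mem_cons.1 hx with rfl | hx
          · exact ⟨hv, by simp, hb⟩
          · obtain ⟨hx1, hx2, hx3⟩ := h2 x hx
            exact ⟨fun h => hx1 (by simp [h]), by simp [hx2], hx3⟩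

-- A's 'while que' BFS loop; returns (visited, cnt, edges, dup)
def solutionLoopA (g : PySem.Dict Int (List Int)) (node : Int) (v : PySem.Set Int)
    (que : List Int) (cnt edges : Int) (dup : Bool) : PySem.Set Int × Int × Int × Bool :=
  match que with
  | [] => (v, cnt, edges, dup)
  | a :: q =>
    let r := (g.getD a []).foldl (pvStepA node) (v, q, cnt, edges, dup)
    solutionLoopA g node r.1 r.2.1 r.2.2.1 r.2.2.2.1 r.2.2.2.2
termination_by ((pvUniv g \ v.toFinset).card, que.length)
decreasing_by
  obtain ⟨new, c', e', d', hr, hnew⟩ := pvInnerA_measure node (g.getD a []) v q cnt edges dup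
  simp only [hr]
  rcases new with _ | ⟨y, new'⟩
  · simp only [List.append_nil]
    exact Prod.Lex.right _ (by simp)
  · exact Prod.Lex.left _ _ (pvCardLt _ _ _ y (by simp) (hnew y (by simp)).1
      (pvMemUniv g a y (hnew y (by simp)).2.1))

-- one pass of A's build loop: out_g, in_g, g (adjacency), nodes (defaultdicts / set, as a 4-tuple)
def pvBuildA (st : PySem.Dict Int Int × PySem.Dict Int Int × PySem.Dict Int (List Int) × PySem.Set Int)
    (p : Int × Int) :
    PySem.Dict Int Int × PySem.Dict Int Int × PySem.Dict Int (List Int) × PySem.Set Int :=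
  (st.1.insert p.1 (st.1.getD p.1 0 + 1),
   st.2.1.insert p.2 (st.2.1.getD p.2 0 + 1),
   st.2.2.1.insert p.1 (st.2.2.1.getD p.1 [] ++ [p.2]),
   PySem.Set.add (PySem.Set.add st.2.2.2 p.1) p.2)

def solution (edges : List (Int × Int)) : List Int :=
  let st := edges.foldl pvBuildA
    (PySem.Dict.empty, PySem.Dict.empty, PySem.Dict.empty, PySem.Set.empty)
  let out_g := st.1
  let in_g := st.2.1
  let g := st.2.2.1
  let nodes := st.2.2.2
  -- 'for x in nodes': Python iterates the set in hash order; ported in insertion order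
  -- (Pre_solution guarantees a unique candidate, so the order cannot matter)
  let sel := nodes.foldl
    (fun (st : Int × Option Int) x =>
      if in_g.getD x 0 = 0 ∧ 2 ≤ out_g.getD x 0 then (x, some x) else st)
    (0, none)
  match sel.2 with
  | none => [sel.1, 0, 0, 0]   -- Python raises NameError ('node' unbound); excluded by Pre_solution
  | some node =>
    -- visited = [0]*(10**6+1): ported as the set of marked ids — exact for ids in -(10^6+1)..10^6
    -- with no two ids 10^6+1 apart (Pre_solution), where each id owns one array slot
    let fin := (g.getD node []).foldl
      (fun (st : PySem.Set Int × Int × Int × Int) x =>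
        let r := solutionLoopA g node (PySem.Set.add st.1 x) [x] 1 0 false
        if r.2.2.2 = false then (r.1, st.2.1, st.2.2.1 + 1, st.2.2.2)
        else if r.2.1 = r.2.2.1 then (r.1, st.2.1 + 1, st.2.2.1, st.2.2.2)
        else if r.2.1 + 1 = r.2.2.1 then (r.1, st.2.1, st.2.2.1, st.2.2.2 + 1)
        else (r.1, st.2.1, st.2.2.1, st.2.2.2))
      (PySem.Set.empty, 0, 0, 0)
    [sel.1, fin.2.1, fin.2.2.1, fin.2.2.2]

-- ===== PORT B =====

-- B builds only the two degree dictionaries (no adjacency structure)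
def pvBuildB (st : PySem.Dict Int Int × PySem.Dict Int Int) (p : Int × Int) :
    PySem.Dict Int Int × PySem.Dict Int Int :=
  (st.1.insert p.1 (st.1.getD p.1 0 + 1), st.2.insert p.2 (st.2.getD p.2 0 + 1))

-- one edge of B's relaxation scan (state: seen, comp, changed)
def pvStepB (gen : Int) (st : PySem.Set Int × PySem.Set Int × Bool) (p : Int × Int) :
    PySem.Set Int × PySem.Set Int × Bool :=
  if p.1 ∈ st.2.1 ∧ p.2 ≠ gen ∧ p.2 ∉ st.1 then
    (PySem.Set.add st.1 p.2, PySem.Set.add st.2.1 p.2, true)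
  else st

-- shape of one full edge scan (cited by solutionLoopB's decreasing_by)
theorem pvScanB_shape (gen : Int) (l : List (Int × Int)) :
    ∀ (seen comp : PySem.Set Int) (ch : Bool), ∃ (new : List Int) (comp' : PySem.Set Int),
      l.foldl (pvStepB gen) (seen, comp, ch)
        = (seen ++ new, comp', ch || decide (new ≠ []))
      ∧ ∀ y ∈ new, y ∉ seen ∧ y ∈ l.map Prod.snd := by
  induction l with
  | nil => intro seen comp ch; exact ⟨[], comp, by simp, by simp⟩
  | cons p l ih =>
    intro seen comp ch
    simp only [List.foldl_cons]
    by_cases hc : p.1 ∈ comp ∧ p.2 ≠ gen ∧ p.2 ∉ seen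
    · have hs : pvStepB gen (seen, comp, ch) p
          = (seen ++ [p.2], PySem.Set.add comp p.2, true) := by
        simp [pvStepB, hc, PySem.Set.add_of_not_mem hc.2.2]
      rw [hs]
      obtain ⟨new, comp', h1, h2⟩ := ih (seen ++ [p.2]) (PySem.Set.add comp p.2) true
      refine ⟨p.2 :: new, comp', ?_, ?_⟩
      · rw [h1]; simp
      · intro y hy
        rcases List.mem_cons.1 hy with rfl | hy
        · exact ⟨hc.2.2, by simp⟩
        · obtain ⟨hy1, hy2⟩ := h2 y hy
          exact ⟨fun h => hy1 (by simp [h]), by simp [hy2]⟩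
    · have hs : pvStepB gen (seen, comp, ch) p = (seen, comp, ch) := by
        simp only [pvStepB, if_neg hc]
      rw [hs]
      obtain ⟨new, comp', h1, h2⟩ := ih seen comp ch
      exact ⟨new, comp', h1, fun y hy => ⟨(h2 y hy).1, by simp [(h2 y hy).2]⟩⟩

-- B's 'while changed' loop: scan the whole edge list; recurse iff the scan added something
def solutionLoopB (edges : List (Int × Int)) (gen : Int) (seen comp : PySem.Set Int) :
    PySem.Set Int × PySem.Set Int :=
  match hres : edges.foldl (pvStepB gen) (seen, comp, false) with
  | (seen', comp', true) => solutionLoopB edges gen seen' comp'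
  | (seen', comp', false) => (seen', comp')
termination_by (((edges.map Prod.snd).toFinset \ seen.toFinset).card)
decreasing_by
  obtain ⟨new, comp'', hr, hnew⟩ := pvScanB_shape gen edges seen comp false
  rw [hres] at hr
  rcases new with _ | ⟨y, new'⟩
  · simp at hr
  · injection hr with h1 hr2
    injection hr2 with h2 h3
    rw [h1]
    exact pvCardLt _ _ _ y (by simp) (hnew y (by simp)).1
      (by simpa using (hnew y (by simp)).2)

def solution_alt (edges : List (Int × Int)) : List Int :=
  let bl := edges.foldl pvBuildB (PySem.Dict.empty, PySem.Dict.empty)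
  let outdeg := bl.1
  let indeg := bl.2
  let cands := (outdeg.items.filter
    (fun p => decide (2 ≤ p.2) && decide (indeg.getD p.1 0 = 0))).map (fun p => p.1)
  match PySem.List.pyGet? cands (-1) with
  | none => [0, 0, 0, 0]   -- Python raises IndexError (cands[-1] of []); excluded by Pre_solution
  | some gen =>
  let fin := ((edges.filter (fun p => p.1 == gen)).map (fun p => p.2)).foldl
    (fun (st : PySem.Set Int × Int × Int × Int) x =>
      let r := solutionLoopB edges gen (PySem.Set.add st.1 x)
        (PySem.Set.add PySem.Set.empty x)
      let n : Int := r.2.length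
      let e : Int := edges.foldl
        (fun s p => if p.1 ∈ r.2 ∧ p.2 ≠ gen then s + 1 else s) 0
      let d := e - n + 1
      if d = 0 then (r.1, st.2.1, st.2.2.1 + 1, st.2.2.2)
      else if d = 1 then (r.1, st.2.1 + 1, st.2.2.1, st.2.2.2)
      else if d = 2 then (r.1, st.2.1, st.2.2.1, st.2.2.2 + 1)
      else (r.1, st.2.1, st.2.2.1, st.2.2.2))
    (PySem.Set.empty, 0, 0, 0)
  [gen, fin.2.1, fin.2.2.1, fin.2.2.2]

-- ===== PRECONDITION & SPEC =====

def pvCountOut (edges : List (Int × Int)) (v : Int) : Nat := (edges.map Prod.fst).count v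
def pvCountIn (edges : List (Int × Int)) (v : Int) : Nat := (edges.map Prod.snd).count v
-- 'generator' candidate: out-degree ≥ 2 and in-degree 0
def pvCandB (edges : List (Int × Int)) (v : Int) : Bool :=
  decide (2 ≤ pvCountOut edges v) && decide (pvCountIn edges v = 0)

-- Pre_ excludes (i) vertex ids outside -(10^6+1)..10^6, where A's fixed-size visited array raises
-- IndexError; (ii) pairs of ids exactly 10^6+1 apart, which that array silently aliases through
-- Python's negative indexing; (iii) inputs without exactly one generator candidate (in-degree 0,
-- out-degree ≥ 2): with none A raises NameError, and with several A's pick depends on Python's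
-- set-iteration (hash) order, which is nobody's specification.
def Pre_solution (edges : List (Int × Int)) : Prop :=
  (∀ v ∈ edges.map Prod.fst ++ edges.map Prod.snd, -1000001 ≤ v ∧ v ≤ 1000000) ∧
  (∀ u ∈ edges.map Prod.fst ++ edges.map Prod.snd,
    ∀ w ∈ edges.map Prod.fst ++ edges.map Prod.snd, u - w ≠ 1000001) ∧
  ((PySem.Set.ofList (edges.map Prod.fst)).filter (pvCandB edges)).length = 1

instance (edges : List (Int × Int)) : Decidable (Pre_solution edges) := by
  unfold Pre_solution; infer_instance

def pvWitness_solution : (List (Int × Int)) := [(1, 2), (1, 3)]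

def Spec_solution (edges : List (Int × Int)) (out : List Int) : Prop := out = solution_alt edges
instance (edges : List (Int × Int)) (out : List Int) : Decidable (Spec_solution edges out) := by
  unfold Spec_solution; infer_instance

-- ===== CLAIM (what is proved, stated in full; the proofs are below) =====
def Claim_equal_solution : Prop := ∀ (edges : List (Int × Int)), Dom_solution edges → Pre_solution edges → Spec_solution edges (solution edges)

-- ===== LEMMAS AND PROOFS =====

-- ---- "new vertices", in discovery order, of scanning one adjacency list against a mark set ----
def pvNStep (p : List Int × List Int) (b : Int) : List Int × List Int :=
  if p.1.contains b then p else (p.1 ++ [b], p.2 ++ [b])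

def pvNew (v l : List Int) : List Int := (l.foldl pvNStep (v, [])).2

theorem pvNStep_acc (l : List Int) : ∀ (v nw : List Int),
    l.foldl pvNStep (v, nw) = (v ++ pvNew v l, nw ++ pvNew v l) := by
  induction l with
  | nil => intro v nw; simp [pvNew]
  | cons b l ih =>
    intro v nw
    by_cases hv : b ∈ v
    · have hs : ∀ nw' : List Int, pvNStep (v, nw') b = (v, nw') := by
        intro nw'; simp [pvNStep, hv]
      have hN : pvNew v (b :: l) = pvNew v l := by
        simp only [pvNew, List.foldl_cons, hs]
      simp only [List.foldl_cons, hs, hN, ih]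
    · have hs : ∀ nw' : List Int, pvNStep (v, nw') b = (v ++ [b], nw' ++ [b]) := by
        intro nw'; simp [pvNStep, hv]
      have hN : pvNew v (b :: l) = b :: pvNew (v ++ [b]) l := by
        simp only [pvNew, List.foldl_cons, hs, ih (v ++ [b]) ([] ++ [b])]
        simp
      simp only [List.foldl_cons, hs, hN, ih (v ++ [b]) (nw ++ [b])]
      simp

theorem pvNew_cons_mem {b : Int} {v : List Int} (l : List Int) (h : b ∈ v) :
    pvNew v (b :: l) = pvNew v l := by
  have hs : pvNStep (v, ([] : List Int)) b = (v, []) := by simp [pvNStep, h]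
  simp only [pvNew, List.foldl_cons, hs]

theorem pvNew_cons_not_mem {b : Int} {v : List Int} (l : List Int) (h : b ∉ v) :
    pvNew v (b :: l) = b :: pvNew (v ++ [b]) l := by
  have hs : pvNStep (v, ([] : List Int)) b = (v ++ [b], [b]) := by simp [pvNStep, h]
  simp only [pvNew, List.foldl_cons, hs, pvNStep_acc l (v ++ [b]) [b]]
  simp

theorem pvNew_len (l : List Int) : ∀ v, (pvNew v l).length ≤ l.length := by
  induction l with
  | nil => intro v; simp [pvNew]
  | cons b l ih =>
    intro v
    by_cases hv : b ∈ v
    · rw [pvNew_cons_mem l hv]; exact (ih v).trans (by simp)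
    · rw [pvNew_cons_not_mem l hv]; simpa using ih (v ++ [b])

theorem pvNew_mem (l : List Int) : ∀ v x, x ∈ pvNew v l → x ∉ v ∧ x ∈ l := by
  induction l with
  | nil => intro v x hx; simp [pvNew] at hx
  | cons b l ih =>
    intro v x hx
    by_cases hv : b ∈ v
    · rw [pvNew_cons_mem l hv] at hx
      obtain ⟨h1, h2⟩ := ih v x hx
      exact ⟨h1, by simp [h2]⟩
    · rw [pvNew_cons_not_mem l hv] at hx
      rcases List.mem_cons.1 hx with rfl | hx
      · exact ⟨hv, by simp⟩
      · obtain ⟨h1, h2⟩ := ih (v ++ [b]) x hx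
        exact ⟨fun h => h1 (by simp [h]), by simp [h2]⟩

theorem pvNew_nodup (l : List Int) : ∀ v, (pvNew v l).Nodup := by
  induction l with
  | nil => intro v; simp [pvNew]
  | cons b l ih =>
    intro v
    by_cases hv : b ∈ v
    · rw [pvNew_cons_mem l hv]; exact ih v
    · rw [pvNew_cons_not_mem l hv]
      refine List.nodup_cons.2 ⟨?_, ih (v ++ [b])⟩
      intro hb
      exact (pvNew_mem l (v ++ [b]) b hb).1 (by simp)

-- ---- A's inner per-edge fold, characterised ----
theorem pvInnerA_char (node : Int) (l : List Int) (hn : node ∉ l) :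
    ∀ (v q : List Int) (c e : Int) (d : Bool),
      l.foldl (pvStepA node) (v, q, c, e, d)
        = (v ++ pvNew v l, q ++ pvNew v l, c + ((pvNew v l).length : Int),
           e + (l.length : Int), d || decide (l.length ≠ (pvNew v l).length)) := by
  induction l with
  | nil => intro v q c e d; simp [pvNew]
  | cons b l ih =>
    intro v q c e d
    have hb : b ≠ node := fun h => hn (by simp [h])
    have hn' : node ∉ l := fun h => hn (by simp [h])
    simp only [List.foldl_cons]
    by_cases hv : b ∈ v
    · have hs : pvStepA node (v, q, c, e, d) b = (v, q, c, e + 1, true) := by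
        simp [pvStepA, hb, hv]
      rw [hs, ih hn', pvNew_cons_mem l hv]
      have hle : (pvNew v l).length ≤ l.length := pvNew_len l v
      have hne2 : l.length + 1 ≠ (pvNew v l).length := by omega
      simp only [Prod.mk.injEq]
      exact ⟨trivial, trivial, trivial,
        by simp only [List.length_cons]; push_cast; ring,
        by simp only [List.length_cons]; simp [hne2]⟩
    · have hs : pvStepA node (v, q, c, e, d) b
          = (v ++ [b], q ++ [b], c + 1, e + 1, d) := by
        simp [pvStepA, hb, hv]
      rw [hs, ih hn', pvNew_cons_not_mem l hv]
      have hiff : (l.length ≠ (pvNew (v ++ [b]) l).length)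
          ↔ ((b :: l).length ≠ (b :: pvNew (v ++ [b]) l).length) := by
        simp only [List.length_cons]; omega
      simp only [Prod.mk.injEq]
      exact ⟨by simp, by simp,
        by simp only [List.length_cons]; push_cast; ring,
        by simp only [List.length_cons]; push_cast; ring,
        by rw [decide_eq_decide.2 hiff]⟩

-- vertices discovered while expanding a whole frontier level
def pvLevelNew (g : PySem.Dict Int (List Int)) : List Int → List Int → List Int
  | _, [] => []
  | v, a :: fr => pvNew v (g.getD a []) ++ pvLevelNew g (v ++ pvNew v (g.getD a [])) fr

-- total out-degree of a list of vertices
def pvDegSum (g : PySem.Dict Int (List Int)) (l : List Int) : Nat :=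
  (l.map (fun a => (g.getD a []).length)).sum

theorem pvDegSum_append (g : PySem.Dict Int (List Int)) (l1 l2 : List Int) :
    pvDegSum g (l1 ++ l2) = pvDegSum g l1 + pvDegSum g l2 := by
  simp [pvDegSum]

theorem pvLevelNew_len (g : PySem.Dict Int (List Int)) :
    ∀ (front v : List Int), (pvLevelNew g v front).length ≤ pvDegSum g front := by
  intro front
  induction front with
  | nil => intro v; simp [pvLevelNew, pvDegSum]
  | cons a fr ih =>
    intro v
    have h1 := pvNew_len (g.getD a []) v
    have h2 := ih (v ++ pvNew v (g.getD a []))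
    simp only [pvLevelNew, List.length_append]
    have : pvDegSum g (a :: fr) = (g.getD a []).length + pvDegSum g fr := by
      simp [pvDegSum]
    omega

theorem pvLevelNew_mem (g : PySem.Dict Int (List Int)) :
    ∀ (front v : List Int) (x : Int), x ∈ pvLevelNew g v front →
      x ∉ v ∧ ∃ a, x ∈ g.getD a [] := by
  intro front
  induction front with
  | nil => intro v x hx; simp [pvLevelNew] at hx
  | cons a fr ih =>
    intro v x hx
    simp only [pvLevelNew] at hx
    rcases List.mem_append.1 hx with hx | hx
    · obtain ⟨h1, h2⟩ := pvNew_mem (g.getD a []) v x hx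
      exact ⟨h1, a, h2⟩
    · obtain ⟨h1, h2⟩ := ih (v ++ pvNew v (g.getD a [])) x hx
      exact ⟨fun h => h1 (by simp [h]), h2⟩

theorem pvLevelNew_nodup (g : PySem.Dict Int (List Int)) :
    ∀ (front v : List Int), (pvLevelNew g v front).Nodup := by
  intro front
  induction front with
  | nil => intro v; simp [pvLevelNew]
  | cons a fr ih =>
    intro v
    simp only [pvLevelNew]
    refine List.Nodup.append (pvNew_nodup (g.getD a []) v) (ih _) ?_
    intro z hz1 hz2
    exact (pvLevelNew_mem g fr _ z hz2).1 (by simp [hz1])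

-- boolean "dup flag" composes over two phases when marks never exceed edge events
theorem pvDupOr (d : Bool) (s1 n1 s2 n2 : Nat) (h1 : n1 ≤ s1) (h2 : n2 ≤ s2) :
    ((d || decide (s1 ≠ n1)) || decide (s2 ≠ n2)) = (d || decide (s1 + s2 ≠ n1 + n2)) := by
  cases d
  · by_cases e1 : s1 = n1
    · by_cases e2 : s2 = n2
      · simp [e1, e2]
      · simp [e1, e2]
    · by_cases e2 : s2 = n2
      · simp [e1, e2]
      · simp [e1, e2]; omega
  · simp

-- ---- A's queue loop processes one whole level ----
theorem pvLevelA (g : PySem.Dict Int (List Int)) (node : Int)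
    (H : ∀ a, node ∉ g.getD a []) :
    ∀ (front : List Int), ∀ (pending v : List Int) (c e : Int) (d : Bool),
      solutionLoopA g node v (front ++ pending) c e d
        = solutionLoopA g node (v ++ pvLevelNew g v front)
            (pending ++ pvLevelNew g v front)
            (c + ((pvLevelNew g v front).length : Int))
            (e + (pvDegSum g front : Int))
            (d || decide (pvDegSum g front ≠ (pvLevelNew g v front).length)) := by
  intro front
  induction front with
  | nil => intro pending v c e d; simp [pvLevelNew, pvDegSum]
  | cons a fr ih =>
    intro pending v c e d
    rw [List.cons_append, solutionLoopA]
    rw [pvInnerA_char node (g.getD a []) (H a) v (fr ++ pending) c e d]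
    have hassoc : (fr ++ pending) ++ pvNew v (g.getD a [])
        = fr ++ (pending ++ pvNew v (g.getD a [])) := by simp
    rw [hassoc, ih (pending ++ pvNew v (g.getD a []))]
    have e1 : pvLevelNew g v (a :: fr)
        = pvNew v (g.getD a []) ++ pvLevelNew g (v ++ pvNew v (g.getD a [])) fr := rfl
    have e2 : pvDegSum g (a :: fr) = (g.getD a []).length + pvDegSum g fr := by
      simp [pvDegSum]
    rw [e1, e2]
    have h1 : (pvNew v (g.getD a [])).length ≤ (g.getD a []).length :=
      pvNew_len (g.getD a []) v
    have h2 : (pvLevelNew g (v ++ pvNew v (g.getD a [])) fr).length ≤ pvDegSum g fr :=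
      pvLevelNew_len g fr (v ++ pvNew v (g.getD a []))
    have hq1 : (v ++ pvNew v (g.getD a []))
          ++ pvLevelNew g (v ++ pvNew v (g.getD a [])) fr
        = v ++ (pvNew v (g.getD a []) ++ pvLevelNew g (v ++ pvNew v (g.getD a [])) fr) := by
      simp
    have hq2 : (pending ++ pvNew v (g.getD a []))
          ++ pvLevelNew g (v ++ pvNew v (g.getD a [])) fr
        = pending ++ (pvNew v (g.getD a []) ++ pvLevelNew g (v ++ pvNew v (g.getD a [])) fr) := by
      simp
    have hq3 : c + ((pvNew v (g.getD a [])).length : Int)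
          + ((pvLevelNew g (v ++ pvNew v (g.getD a [])) fr).length : Int)
        = c + (((pvNew v (g.getD a [])
            ++ pvLevelNew g (v ++ pvNew v (g.getD a [])) fr).length : Int)) := by
      simp only [List.length_append]; push_cast; ring
    have hq4 : e + ((g.getD a []).length : Int) + (pvDegSum g fr : Int)
        = e + (((g.getD a []).length + pvDegSum g fr : Nat) : Int) := by
      push_cast; ring
    have hq5 : ((d || decide ((g.getD a []).length ≠ (pvNew v (g.getD a [])).length))
          || decide (pvDegSum g fr ≠ (pvLevelNew g (v ++ pvNew v (g.getD a [])) fr).length))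
        = (d || decide ((g.getD a []).length + pvDegSum g fr
            ≠ (pvNew v (g.getD a [])
                ++ pvLevelNew g (v ++ pvNew v (g.getD a [])) fr).length)) := by
      rw [pvDupOr d _ _ _ _ h1 h2, List.length_append]
    rw [hq1, hq2, hq3, hq4, hq5]

-- ---- A's BFS, characterised: final marks, count, edge count, dup flag ----
theorem pvLoopEq_flat (g : PySem.Dict Int (List Int)) (node : Int)
    (H : ∀ a, node ∉ g.getD a []) (v frontier : List Int) (c e : Int) (d : Bool)
    (hfl : pvLevelNew g v frontier = []) :
    solutionLoopA g node v frontier c e d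
        = (v, c, e + (pvDegSum g frontier : Int),
           d || decide (pvDegSum g frontier ≠ 0)) := by
  have := pvLevelA g node H frontier [] v c e d
  simp only [List.append_nil, hfl, List.length_nil, Nat.cast_zero, add_zero] at this
  rw [this, solutionLoopA]

theorem pvLoopEq (g : PySem.Dict Int (List Int)) (node : Int)
    (H : ∀ a, node ∉ g.getD a []) :
    ∀ (k : Nat) (v frontier : List Int) (c e : Int) (d : Bool),
      (pvUniv g \ v.toFinset).card ≤ k →
      ∃ ns : List Int,
        solutionLoopA g node v frontier c e d
            = (v ++ ns, c + (ns.length : Int), e + (pvDegSum g (frontier ++ ns) : Int),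
               d || decide (pvDegSum g (frontier ++ ns) ≠ ns.length))
        ∧ ns.length ≤ pvDegSum g (frontier ++ ns)
        ∧ ns.Nodup ∧ ∀ y ∈ ns, y ∉ v := by
  intro k
  induction k with
  | zero =>
    intro v frontier c e d hk
    have hfl : pvLevelNew g v frontier = [] := by
      rcases h : pvLevelNew g v frontier with _ | ⟨y, lv'⟩
      · rfl
      · exfalso
        obtain ⟨hy1, a, hy2⟩ := pvLevelNew_mem g frontier v y (by rw [h]; simp)
        have hy3 : y ∈ pvUniv g \ v.toFinset := by
          simp [Finset.mem_sdiff, pvMemUniv g a y hy2, hy1]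
        have : 0 < (pvUniv g \ v.toFinset).card := Finset.card_pos.2 ⟨y, hy3⟩
        omega
    have hA := pvLoopEq_flat g node H v frontier c e d hfl
    exact ⟨[], by simpa using hA, by simp, by simp, by simp⟩
  | succ k ih =>
    intro v frontier c e d hk
    rcases hfl : pvLevelNew g v frontier with _ | ⟨y, lv'⟩
    · have hA := pvLoopEq_flat g node H v frontier c e d hfl
      exact ⟨[], by simpa using hA, by simp, by simp, by simp⟩
    · rcases frontier with _ | ⟨f0, fr⟩
      · simp [pvLevelNew] at hfl
      · have hlv : pvLevelNew g v (f0 :: fr) = y :: lv' := hfl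
        obtain ⟨hy1, ay, hy2⟩ := pvLevelNew_mem g (f0 :: fr) v y (by rw [hlv]; simp)
        have hcard : (pvUniv g \ (v ++ y :: lv').toFinset).card ≤ k := by
          have := pvCardLt (pvUniv g) v (y :: lv') y (by simp) hy1 (pvMemUniv g ay y hy2)
          omega
        obtain ⟨ns', hA, hle, hnd, hdisj⟩ := ih (v ++ y :: lv') (y :: lv')
          (c + ((y :: lv').length : Int)) (e + (pvDegSum g (f0 :: fr) : Int))
          (d || decide (pvDegSum g (f0 :: fr) ≠ (y :: lv').length)) hcard
        have h1 : (y :: lv').length ≤ pvDegSum g (f0 :: fr) := by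
          have := pvLevelNew_len g (f0 :: fr) v
          rw [hlv] at this; exact this
        refine ⟨y :: lv' ++ ns', ?_, ?_, ?_, ?_⟩
        · have hstep := pvLevelA g node H (f0 :: fr) [] v c e d
          simp only [List.append_nil, hlv, List.nil_append] at hstep
          rw [hstep, hA]
          have hL : (y :: lv' ++ ns').length = (y :: lv').length + ns'.length := by
            simp; omega
          have hD : pvDegSum g ((f0 :: fr) ++ (y :: lv' ++ ns'))
              = pvDegSum g (f0 :: fr) + pvDegSum g (y :: lv' ++ ns') := by
            rw [pvDegSum_append]
          have hD2 : pvDegSum g (y :: lv' ++ ns') = pvDegSum g ((y :: lv') ++ ns') := rfl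
          simp only [Prod.mk.injEq]
          refine ⟨by simp, ?_, ?_, ?_⟩
          · rw [hL]; push_cast; ring
          · rw [hD, hD2]; push_cast; ring
          · rw [hD, hD2, hL]
            exact pvDupOr d _ _ _ _ h1 hle
        · have hA1 : pvDegSum g (f0 :: fr ++ (y :: lv' ++ ns'))
              = pvDegSum g (f0 :: fr) + (pvDegSum g (y :: lv') + pvDegSum g ns') := by
            rw [show f0 :: fr ++ (y :: lv' ++ ns') = (f0 :: fr) ++ ((y :: lv') ++ ns') by simp,
              pvDegSum_append, pvDegSum_append]
          have hA2 : (y :: lv' ++ ns').length = (y :: lv').length + ns'.length := by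
            simp; omega
          have hA3 := hle
          rw [pvDegSum_append] at hA3
          omega
        · have hndl : (y :: lv').Nodup := by rw [← hlv]; exact pvLevelNew_nodup g (f0 :: fr) v
          refine List.Nodup.append hndl hnd ?_
          intro z hz1 hz2
          exact (hdisj z hz2) (by simp [hz1])
        · intro z hz
          rcases List.mem_append.1 hz with hz | hz
          · exact (by rw [← hlv] at hz; exact (pvLevelNew_mem g (f0 :: fr) v z hz).1)
          · intro hzv; exact (hdisj z hz) (by simp [hzv])

-- ---- reachability closure shared by the two traversals ----
inductive pvCl (g : PySem.Dict Int (List Int)) (node : Int) (s0 : List Int) (x : Int) : Int → Prop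
  | base : pvCl g node s0 x x
  | step {a b : Int} : pvCl g node s0 x a → b ∈ g.getD a [] → b ≠ node → b ∉ s0 →
      pvCl g node s0 x b

theorem pvCl_not_s0 (g : PySem.Dict Int (List Int)) (node x : Int) {s0 : List Int} {y : Int}
    (hd : pvCl g node s0 x y) : y = x ∨ y ∉ s0 := by
  cases hd with
  | base => exact Or.inl rfl
  | step _ _ _ hs => exact Or.inr hs

-- every neighbour (≠ node) of a dequeued vertex ends up marked
theorem pvInnerA_post (node : Int) (l : List Int) :
    ∀ (v q : List Int) (c e : Int) (d : Bool) (b : Int), b ∈ l → b ≠ node →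
      b ∈ (l.foldl (pvStepA node) (v, q, c, e, d)).1 := by
  induction l with
  | nil => intro v q c e d b hb; simp at hb
  | cons hd l ih =>
    intro v q c e d b hb hbn
    simp only [List.foldl_cons]
    rcases List.mem_cons.1 hb with rfl | hb
    · -- b is the head: it is marked by its own step, marks only grow afterwards
      have hstep : b ∈ (pvStepA node (v, q, c, e, d) b).1 := by
        by_cases hv : b ∈ v
        · simp [pvStepA, hbn, hv]
        · simp [pvStepA, hbn, hv, PySem.Set.add_of_not_mem hv]
      rcases hst : pvStepA node (v, q, c, e, d) b with ⟨v', q', c', e', d'⟩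
      rw [hst] at hstep
      obtain ⟨new, c'', e'', d'', hfold, -⟩ := pvInnerA_measure node l v' q' c' e' d'
      rw [hfold]
      simp only [Prod.fst]
      exact List.mem_append_left _ hstep
    · rcases hst : pvStepA node (v, q, c, e, d) hd with ⟨v', q', c', e', d'⟩
      exact ih v' q' c' e' d' b hb hbn

theorem pvLoopA_mono (g : PySem.Dict Int (List Int)) (node : Int) :
    ∀ (v : PySem.Set Int) (que : List Int) (c e : Int) (d : Bool) (y : Int), y ∈ v →
      y ∈ (solutionLoopA g node v que c e d).1 := by
  intro v que c e d
  induction v, que, c, e, d using solutionLoopA.induct g node with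
  | case1 v c e d => intro y hy; simpa [solutionLoopA] using hy
  | case2 v c e d a q r ih =>
    intro y hy
    rw [solutionLoopA]
    have hrdef : r = (g.getD a []).foldl (pvStepA node) (v, q, c, e, d) := rfl
    obtain ⟨new, c', e', d', hfold, -⟩ := pvInnerA_measure node (g.getD a []) v q c e d
    rw [hrdef, hfold] at ih
    rw [hfold]
    exact ih y (List.mem_append_left _ hy)

theorem pvLoopA_sound (g : PySem.Dict Int (List Int)) (node : Int) (s0 : List Int) (x : Int) :
    ∀ (v : PySem.Set Int) (que : List Int) (c e : Int) (d : Bool),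
      (∀ y ∈ s0, y ∈ v) →
      (∀ y ∈ v, y ∈ s0 ∨ pvCl g node s0 x y) →
      (∀ y ∈ que, pvCl g node s0 x y) →
      ∀ y ∈ (solutionLoopA g node v que c e d).1, y ∈ s0 ∨ pvCl g node s0 x y := by
  intro v que c e d
  induction v, que, c, e, d using solutionLoopA.induct g node with
  | case1 v c e d => intro h0 hv hq y hy; exact hv y (by simpa [solutionLoopA] using hy)
  | case2 v c e d a q r ih =>
    intro h0 hv hq y hy
    rw [solutionLoopA] at hy
    have hrdef : r = (g.getD a []).foldl (pvStepA node) (v, q, c, e, d) := rfl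
    obtain ⟨new, c', e', d', hfold, hnew⟩ := pvInnerA_measure node (g.getD a []) v q c e d
    rw [hrdef, hfold] at ih
    rw [hfold] at hy
    have hCa : pvCl g node s0 x a := hq a (by simp)
    have hnewCl : ∀ z ∈ new, pvCl g node s0 x z := by
      intro z hz
      obtain ⟨hz1, hz2, hz3⟩ := hnew z hz
      exact pvCl.step hCa hz2 hz3 (fun hzs => hz1 (h0 z hzs))
    refine ih ?_ ?_ ?_ y hy
    · intro z hz; exact List.mem_append_left _ (h0 z hz)
    · intro z hz
      rcases List.mem_append.1 hz with hz | hz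
      · exact hv z hz
      · exact Or.inr (hnewCl z hz)
    · intro z hz
      rcases List.mem_append.1 hz with hz | hz
      · exact hq z (by simp [hz])
      · exact hnewCl z hz

theorem pvLoopA_closed (g : PySem.Dict Int (List Int)) (node : Int) (seen : List Int) (x : Int) :
    ∀ (v : PySem.Set Int) (que : List Int) (c e : Int) (d : Bool),
      (∀ y ∈ que, y ∈ v) →
      (∀ a ∈ v, a ∉ que → (a ∈ seen ∧ a ≠ x) ∨
        (∀ b ∈ g.getD a [], b ≠ node → b ∈ v)) →
      ∀ a ∈ (solutionLoopA g node v que c e d).1,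
        (a ∈ seen ∧ a ≠ x) ∨
        (∀ b ∈ g.getD a [], b ≠ node → b ∈ (solutionLoopA g node v que c e d).1) := by
  intro v que c e d
  induction v, que, c, e, d using solutionLoopA.induct g node with
  | case1 v c e d =>
    intro hq hinv a ha
    rcases hinv a (by simpa [solutionLoopA] using ha) (by simp) with h | h
    · exact Or.inl h
    · exact Or.inr (by intro b hb hbn; simpa [solutionLoopA] using h b hb hbn)
  | case2 v c e d a0 q r ih =>
    intro hq hinv
    rw [solutionLoopA]
    have hrdef : r = (g.getD a0 []).foldl (pvStepA node) (v, q, c, e, d) := rfl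
    obtain ⟨new, c', e', d', hfold, hnew⟩ := pvInnerA_measure node (g.getD a0 []) v q c e d
    rw [hrdef, hfold] at ih
    rw [hfold]
    refine ih ?_ ?_
    · intro z hz
      rcases List.mem_append.1 hz with hz | hz
      · exact List.mem_append_left _ (hq z (by simp [hz]))
      · exact List.mem_append_right _ hz
    · intro z hz hzq
      rcases List.mem_append.1 hz with hz | hz
      · by_cases hza : z = a0
        · subst hza
          refine Or.inr ?_
          intro b hb hbn
          have := pvInnerA_post node (g.getD z []) v q c e d b hb hbn
          rw [hfold] at this
          exact this
        · rcases hinv z hz (by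
            simp only [List.mem_cons, not_or]
            exact ⟨hza, fun h => hzq (List.mem_append_left _ h)⟩) with h | h
          · exact Or.inl h
          · exact Or.inr (fun b hb hbn => List.mem_append_left _ (h b hb hbn))
      · exact absurd (List.mem_append_right _ hz) hzq

-- A's per-start reachable marks = old marks ∪ the closure
theorem pvReachA (g : PySem.Dict Int (List Int)) (node : Int) (seen : PySem.Set Int) (x : Int)
    (c e : Int) (d : Bool) :
    ∀ y, y ∈ (solutionLoopA g node (PySem.Set.add seen x) [x] c e d).1 ↔
      (y ∈ PySem.Set.add seen x ∨ pvCl g node (PySem.Set.add seen x) x y) := by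
  intro y
  constructor
  · intro hy
    refine pvLoopA_sound g node (PySem.Set.add seen x) x _ _ c e d
      (fun z hz => hz) (fun z hz => Or.inl hz) ?_ y hy
    intro z hz
    simp only [List.mem_singleton] at hz
    subst hz; exact pvCl.base
  · have hcl := pvLoopA_closed g node seen x (PySem.Set.add seen x) [x] c e d
      (by intro z hz; simp only [List.mem_singleton] at hz; subst hz
          simp [PySem.Set.mem_add])
      (by intro a ha hax
          simp only [List.mem_singleton] at hax
          rcases (PySem.Set.mem_add _ _ _).1 ha with h | h
          · exact Or.inl ⟨h, hax⟩
          · exact absurd h hax)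
    rintro (hy | hy)
    · exact pvLoopA_mono g node _ _ c e d y hy
    · induction hy with
      | base =>
        exact pvLoopA_mono g node _ _ c e d x (by simp [PySem.Set.mem_add])
      | step ha hb hn hs ih =>
        rcases hcl _ ih with ⟨h1, h2⟩ | h
        · rcases pvCl_not_s0 g node x ha with rfl | hns0
          · exact absurd rfl h2
          · exact absurd (by simp [PySem.Set.mem_add, h1]) hns0
        · exact h _ hb hn

-- ---- B's fixpoint loop, characterised ----

-- once the scan has found nothing and the flag is down, the state is literally unchanged
theorem pvScanB_noflag (gen : Int) (l : List (Int × Int)) :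
    ∀ (seen comp seen' comp' : PySem.Set Int),
      l.foldl (pvStepB gen) (seen, comp, false) = (seen', comp', false) →
      seen' = seen ∧ comp' = comp ∧
      ∀ p ∈ l, ¬ (p.1 ∈ comp ∧ p.2 ≠ gen ∧ p.2 ∉ seen) := by
  induction l with
  | nil => intro seen comp seen' comp' h; simp at h; exact ⟨h.1.symm, h.2.symm, by simp⟩
  | cons p l ih =>
    intro seen comp seen' comp' h
    simp only [List.foldl_cons] at h
    by_cases hc : p.1 ∈ comp ∧ p.2 ≠ gen ∧ p.2 ∉ seen
    · exfalso
      have hs : pvStepB gen (seen, comp, false) p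
          = (PySem.Set.add seen p.2, PySem.Set.add comp p.2, true) := by
        simp [pvStepB, hc]
      rw [hs] at h
      obtain ⟨new, comp'', hsh, -⟩ :=
        pvScanB_shape gen l (PySem.Set.add seen p.2) (PySem.Set.add comp p.2) true
      rw [hsh] at h
      simpa using congrArg (fun t => t.2.2) h
    · have hs : pvStepB gen (seen, comp, false) p = (seen, comp, false) := by
        simp only [pvStepB, if_neg hc]
      rw [hs] at h
      obtain ⟨h1, h2, h3⟩ := ih seen comp seen' comp' h
      refine ⟨h1, h2, ?_⟩
      intro q hq
      rcases List.mem_cons.1 hq with rfl | hq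
      · exact hc
      · exact h3 q hq

-- the invariants one scan preserves
theorem pvScanB_inv (g : PySem.Dict Int (List Int)) (node : Int) (s0 : List Int) (x : Int)
    (edges : List (Int × Int))
    (Hadj : ∀ a b : Int, b ∈ g.getD a [] ↔ (a, b) ∈ edges) :
    ∀ (l : List (Int × Int)), (∀ p ∈ l, p ∈ edges) →
    ∀ (seen comp : PySem.Set Int) (ch : Bool),
      (∀ y, y ∈ seen ↔ (y ∈ s0 ∨ y ∈ comp)) →
      (∀ y ∈ comp, pvCl g node s0 x y) →
      comp.Nodup →
      ((∀ y, y ∈ (l.foldl (pvStepB node) (seen, comp, ch)).1 ↔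
          (y ∈ s0 ∨ y ∈ (l.foldl (pvStepB node) (seen, comp, ch)).2.1)) ∧
       (∀ y ∈ (l.foldl (pvStepB node) (seen, comp, ch)).2.1, pvCl g node s0 x y) ∧
       (l.foldl (pvStepB node) (seen, comp, ch)).2.1.Nodup ∧
       (∀ y ∈ comp, y ∈ (l.foldl (pvStepB node) (seen, comp, ch)).2.1)) := by
  intro l
  induction l with
  | nil => intro _ seen comp ch h1 h2 h3; exact ⟨h1, h2, h3, fun y hy => hy⟩
  | cons p l ih =>
    intro hl seen comp ch h1 h2 h3
    have hpe : p ∈ edges := hl p (by simp)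
    have hl' : ∀ q ∈ l, q ∈ edges := fun q hq => hl q (by simp [hq])
    simp only [List.foldl_cons]
    by_cases hc : p.1 ∈ comp ∧ p.2 ≠ node ∧ p.2 ∉ seen
    · have hnc : p.2 ∉ comp := fun h => hc.2.2 ((h1 p.2).2 (Or.inr h))
      have hns0 : p.2 ∉ s0 := fun h => hc.2.2 ((h1 p.2).2 (Or.inl h))
      have hs : pvStepB node (seen, comp, ch) p
          = (seen ++ [p.2], comp ++ [p.2], true) := by
        simp [pvStepB, hc, PySem.Set.add_of_not_mem hc.2.2, PySem.Set.add_of_not_mem hnc]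
      rw [hs]
      have hcl2 : pvCl g node s0 x p.2 :=
        pvCl.step (h2 p.1 hc.1) ((Hadj p.1 p.2).2 hpe) hc.2.1 hns0
      obtain ⟨k1, k2, k3, k4⟩ := ih hl' (seen ++ [p.2]) (comp ++ [p.2]) true
        (by intro y
            constructor
            · intro hy
              rcases List.mem_append.1 hy with hy | hy
              · rcases (h1 y).1 hy with h | h
                · exact Or.inl h
                · exact Or.inr (List.mem_append_left _ h)
              · exact Or.inr (List.mem_append_right _ hy)
            · rintro (hy | hy)
              · exact List.mem_append_left _ ((h1 y).2 (Or.inl hy))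
              · rcases List.mem_append.1 hy with hy | hy
                · exact List.mem_append_left _ ((h1 y).2 (Or.inr hy))
                · exact List.mem_append_right _ hy)
        (by intro y hy
            rcases List.mem_append.1 hy with hy | hy
            · exact h2 y hy
            · simp only [List.mem_singleton] at hy; subst hy; exact hcl2)
        (by exact List.Nodup.append h3 (by simp) (by
              intro z hz1 hz2
              simp only [List.mem_singleton] at hz2
              subst hz2; exact hnc hz1))
      exact ⟨k1, k2, k3, fun y hy => k4 y (List.mem_append_left _ hy)⟩
    · have hs : pvStepB node (seen, comp, ch) p = (seen, comp, ch) := by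
        simp only [pvStepB, if_neg hc]
      rw [hs]
      exact ih hl' seen comp ch h1 h2 h3

theorem pvLoopB_step_true {edges : List (Int × Int)} {gen : Int}
    {seen comp seen' comp' : PySem.Set Int}
    (h : edges.foldl (pvStepB gen) (seen, comp, false) = (seen', comp', true)) :
    solutionLoopB edges gen seen comp = solutionLoopB edges gen seen' comp' := by
  rw [solutionLoopB]
  split
  next s c hres =>
    rw [h] at hres
    injection hres with h1 hres2
    injection hres2 with h2 h3
    rw [h1, h2]
  next s c hres =>
    rw [h] at hres
    injection hres with h1 hres2
    injection hres2 with h2 h3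
    exact absurd h3.symm (by simp)

theorem pvLoopB_step_false {edges : List (Int × Int)} {gen : Int}
    {seen comp seen' comp' : PySem.Set Int}
    (h : edges.foldl (pvStepB gen) (seen, comp, false) = (seen', comp', false)) :
    solutionLoopB edges gen seen comp = (seen', comp') := by
  rw [solutionLoopB]
  split
  next s c hres =>
    rw [h] at hres
    injection hres with h1 hres2
    injection hres2 with h2 h3
    exact absurd h3.symm (by simp)
  next s c hres =>
    rw [h] at hres
    injection hres with h1 hres2
    injection hres2 with h2 h3
    rw [h1, h2]

theorem pvLoopB_char (g : PySem.Dict Int (List Int)) (s0 : List Int) (x : Int)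
    (edges : List (Int × Int)) (gen : Int)
    (Hadj : ∀ a b : Int, b ∈ g.getD a [] ↔ (a, b) ∈ edges) :
    ∀ (seen comp : PySem.Set Int),
      (∀ y, y ∈ seen ↔ (y ∈ s0 ∨ y ∈ comp)) →
      (∀ y ∈ comp, pvCl g gen s0 x y) →
      comp.Nodup →
      ((∀ y, y ∈ (solutionLoopB edges gen seen comp).1 ↔
          (y ∈ s0 ∨ y ∈ (solutionLoopB edges gen seen comp).2)) ∧
       (∀ y ∈ (solutionLoopB edges gen seen comp).2, pvCl g gen s0 x y) ∧
       (solutionLoopB edges gen seen comp).2.Nodup ∧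
       (∀ y ∈ comp, y ∈ (solutionLoopB edges gen seen comp).2) ∧
       (∀ p ∈ edges, p.1 ∈ (solutionLoopB edges gen seen comp).2 → p.2 ≠ gen →
          p.2 ∈ (solutionLoopB edges gen seen comp).1)) := by
  intro seen comp
  induction seen, comp using solutionLoopB.induct edges gen with
  | case1 seen comp seen' comp' hres ih =>
    intro h1 h2 h3
    obtain ⟨k1, k2, k3, k4⟩ := pvScanB_inv g gen s0 x edges Hadj edges
      (fun p hp => hp) seen comp false h1 h2 h3
    rw [hres] at k1 k2 k3 k4
    rw [pvLoopB_step_true hres]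
    obtain ⟨m1, m2, m3, m4, m5⟩ := ih k1 k2 k3
    exact ⟨m1, m2, m3, fun y hy => m4 y (k4 y hy), m5⟩
  | case2 seen comp seen' comp' hres =>
    intro h1 h2 h3
    obtain ⟨hseen, hcomp, hfix⟩ := pvScanB_noflag gen edges seen comp seen' comp' hres
    rw [pvLoopB_step_false hres]
    subst hseen; subst hcomp
    refine ⟨h1, h2, h3, fun y hy => hy, ?_⟩
    intro p hp hp1 hp2
    by_cases hps : p.2 ∈ seen'
    · exact hps
    · exact absurd ⟨hp1, hp2, hps⟩ (hfix p hp)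

-- ---- counting: membership count over the edge list = degree sum ----
theorem pvCountP_or (es : List (Int × Int)) (f h : Int × Int → Bool)
    (hdisj : ∀ p, ¬ (f p = true ∧ h p = true)) :
    es.countP (fun p => f p || h p) = es.countP f + es.countP h := by
  induction es with
  | nil => simp
  | cons p es ih =>
    simp only [List.countP_cons, ih]
    by_cases hf : f p = true
    · have hh : h p = false := by
        by_cases h' : h p = true
        · exact absurd ⟨hf, h'⟩ (hdisj p)
        · simpa using h'
      simp [hf, hh]; omega
    · simp only [Bool.not_eq_true] at hf
      by_cases hh : h p = true
      · simp [hf, hh]; omega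
      · simp only [Bool.not_eq_true] at hh
        simp [hf, hh]

theorem pvCountP_memsum (es : List (Int × Int)) :
    ∀ (L : List Int), L.Nodup →
      es.countP (fun p => decide (p.1 ∈ L))
        = (L.map (fun a => es.countP (fun p => p.1 == a))).sum := by
  intro L
  induction L with
  | nil => intro _; simp
  | cons a L ih =>
    intro hnd
    have hna : a ∉ L := (List.nodup_cons.1 hnd).1
    have hfeq : (fun p : Int × Int => decide (p.1 ∈ a :: L))
        = (fun p : Int × Int => (p.1 == a) || decide (p.1 ∈ L)) := by
      funext p
      by_cases h : p.1 = a <;> simp [List.mem_cons, h]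
    rw [hfeq, pvCountP_or]
    · rw [ih (List.nodup_cons.1 hnd).2]
      simp
    · intro p ⟨h1, h2⟩
      simp only [beq_iff_eq] at h1
      simp only [decide_eq_true_eq] at h2
      exact hna (h1 ▸ h2)

-- B's edge-counting fold is a countP
theorem pvEfold (edges : List (Int × Int)) (C : List Int) (gen : Int) :
    edges.foldl (fun s p => if p.1 ∈ C ∧ p.2 ≠ gen then s + 1 else s) 0
      = (edges.countP (fun p => decide (p.1 ∈ C) && decide (p.2 ≠ gen)) : Int) := by
  have h : (fun (s : Int) (p : Int × Int) => if p.1 ∈ C ∧ p.2 ≠ gen then s + 1 else s)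
      = (fun (s : Int) (p : Int × Int) =>
          if (fun q : Int × Int => decide (q.1 ∈ C) && decide (q.2 ≠ gen)) p = true
          then s + 1 else s) := by
    funext s p
    by_cases h1 : p.1 ∈ C <;> by_cases h2 : p.2 = gen <;> simp [h1, h2]
  rw [h, PySem.List.foldl_count_if]
  simp

-- ---- splitting the two build folds into independent component folds ----
theorem pvBuildA_proj (edges : List (Int × Int)) :
    ∀ s : PySem.Dict Int Int × PySem.Dict Int Int × PySem.Dict Int (List Int) × PySem.Set Int,
      edges.foldl pvBuildA s
        = (edges.foldl (fun d p => d.insert p.1 (d.getD p.1 0 + 1)) s.1,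
           edges.foldl (fun d p => d.insert p.2 (d.getD p.2 0 + 1)) s.2.1,
           edges.foldl (fun d p => d.insert p.1 (d.getD p.1 [] ++ [p.2])) s.2.2.1,
           edges.foldl (fun n p => PySem.Set.add (PySem.Set.add n p.1) p.2) s.2.2.2) := by
  induction edges with
  | nil => intro s; rfl
  | cons p rest ih =>
    intro s
    simp only [List.foldl_cons, ih]
    rfl

theorem pvBuildB_proj (edges : List (Int × Int)) :
    ∀ s : PySem.Dict Int Int × PySem.Dict Int Int,
      edges.foldl pvBuildB s
        = (edges.foldl (fun d p => d.insert p.1 (d.getD p.1 0 + 1)) s.1,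
           edges.foldl (fun d p => d.insert p.2 (d.getD p.2 0 + 1)) s.2) := by
  induction edges with
  | nil => intro s; rfl
  | cons p rest ih =>
    intro s
    simp only [List.foldl_cons, ih]
    rfl

-- ---- the built dictionaries, in terms of degree counts ----
theorem pvOutDegEq (edges : List (Int × Int)) (x : Int) :
    (edges.foldl (fun (d : PySem.Dict Int Int) p => d.insert p.1 (d.getD p.1 0 + 1))
        PySem.Dict.empty).getD x 0 = (pvCountOut edges x : Int) := by
  rw [show List.foldl (fun (d : PySem.Dict Int Int) p => d.insert p.1 (d.getD p.1 0 + 1))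
        PySem.Dict.empty edges
      = List.foldl (fun (d : PySem.Dict Int Int) k => d.insert k (d.getD k 0 + 1))
        PySem.Dict.empty (edges.map Prod.fst) from
      (List.foldl_map (f := Prod.fst)
        (g := fun (d : PySem.Dict Int Int) k => d.insert k (d.getD k 0 + 1))).symm]
  rw [PySem.Dict.getD_foldl_insert_add_one]
  simp [pvCountOut]

theorem pvInDegEq (edges : List (Int × Int)) (x : Int) :
    (edges.foldl (fun (d : PySem.Dict Int Int) p => d.insert p.2 (d.getD p.2 0 + 1))
        PySem.Dict.empty).getD x 0 = (pvCountIn edges x : Int) := by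
  rw [show List.foldl (fun (d : PySem.Dict Int Int) p => d.insert p.2 (d.getD p.2 0 + 1))
        PySem.Dict.empty edges
      = List.foldl (fun (d : PySem.Dict Int Int) k => d.insert k (d.getD k 0 + 1))
        PySem.Dict.empty (edges.map Prod.snd) from
      (List.foldl_map (f := Prod.snd)
        (g := fun (d : PySem.Dict Int Int) k => d.insert k (d.getD k 0 + 1))).symm]
  rw [PySem.Dict.getD_foldl_insert_add_one]
  simp [pvCountIn]

-- the items of the out-degree dictionary both ports build
theorem pvOutItems (edges : List (Int × Int)) :
    (edges.foldl (fun (d : PySem.Dict Int Int) p => d.insert p.1 (d.getD p.1 0 + 1))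
        PySem.Dict.empty).items
      = (PySem.Set.ofList (edges.map Prod.fst)).map
          (fun k => (k, (pvCountOut edges k : Int))) := by
  rw [show List.foldl (fun (d : PySem.Dict Int Int) p => d.insert p.1 (d.getD p.1 0 + 1))
        PySem.Dict.empty edges
      = List.foldl (fun (d : PySem.Dict Int Int) k => d.insert k (d.getD k 0 + 1))
        PySem.Dict.empty (edges.map Prod.fst) from
      (List.foldl_map (f := Prod.fst)
        (g := fun (d : PySem.Dict Int Int) k => d.insert k (d.getD k 0 + 1))).symm]
  rw [PySem.Dict.foldl_insert_getD_add_one_eq_counter, PySem.Dict.items_counter]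
  rfl

theorem pvAdjEq (edges : List (Int × Int)) (k : Int) :
    (edges.foldl (fun (d : PySem.Dict Int (List Int)) p => d.insert p.1 (d.getD p.1 [] ++ [p.2]))
        PySem.Dict.empty).getD k []
      = (edges.filter (fun p => p.1 == k)).map (fun p => p.2) := by
  have hfun : (fun (d : PySem.Dict Int (List Int)) (p : Int × Int) =>
        d.insert p.1 (d.getD p.1 [] ++ [p.2]))
      = (fun d p => d.modify p.1 [] (fun x => x ++ [p.2])) := rfl
  rw [hfun, PySem.Dict.getD_foldl_modify_append]
  simp

-- ---- membership in A's node set ----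
theorem pvNodesMem (edges : List (Int × Int)) :
    ∀ (s : PySem.Set Int) (x : Int),
      x ∈ edges.foldl (fun (n : PySem.Set Int) p => PySem.Set.add (PySem.Set.add n p.1) p.2) s
        ↔ x ∈ s ∨ ∃ p ∈ edges, x = p.1 ∨ x = p.2 := by
  induction edges with
  | nil => intro s x; simp
  | cons p rest ih =>
    intro s x
    simp only [List.foldl_cons, ih, PySem.Set.mem_add]
    constructor
    · rintro (((h | h) | h) | ⟨q, hq, h⟩)
      · exact Or.inl h
      · exact Or.inr ⟨p, by simp, Or.inl h⟩
      · exact Or.inr ⟨p, by simp, Or.inr h⟩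
      · exact Or.inr ⟨q, by simp [hq], h⟩
    · rintro (h | ⟨q, hq, h⟩)
      · exact Or.inl (Or.inl (Or.inl h))
      · rcases List.mem_cons.1 hq with rfl | hq
        · rcases h with h | h
          · exact Or.inl (Or.inl (Or.inr h))
          · exact Or.inl (Or.inr h)
        · exact Or.inr ⟨q, hq, h⟩

-- ---- a fold keeping the LAST match: with a unique match it returns that match ----
theorem pvFoldStay {α β : Type} (P : α → Prop) [DecidablePred P] (f : α → β) (vc : β) :
    ∀ l : List α, (∀ x ∈ l, P x → f x = vc) →
      l.foldl (fun acc x => if P x then f x else acc) vc = vc := by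
  intro l
  induction l with
  | nil => intro _; rfl
  | cons y l ih =>
    intro h
    simp only [List.foldl_cons]
    by_cases hy : P y
    · rw [if_pos hy, h y (by simp) hy]
      exact ih (fun x hx => h x (by simp [hx]))
    · rw [if_neg hy]
      exact ih (fun x hx => h x (by simp [hx]))

theorem pvFoldLast {α β : Type} (P : α → Prop) [DecidablePred P] (f : α → β) (vc : β) :
    ∀ (l : List α) (acc : β), (∃ x ∈ l, P x) → (∀ x ∈ l, P x → f x = vc) →
      l.foldl (fun acc x => if P x then f x else acc) acc = vc := by
  intro l
  induction l with
  | nil => intro acc h _; simp at h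
  | cons y l ih =>
    intro acc hex hall
    simp only [List.foldl_cons]
    by_cases hy : P y
    · rw [if_pos hy, hall y (by simp) hy]
      exact pvFoldStay P f vc l (fun x hx => hall x (by simp [hx]))
    · rw [if_neg hy]
      obtain ⟨x, hx, hPx⟩ := hex
      rcases List.mem_cons.1 hx with rfl | hx
      · exact absurd hPx hy
      · exact ih acc ⟨x, hx, hPx⟩ (fun x hx => hall x (by simp [hx]))

-- ---- the unique generator candidate Pre_solution provides ----
theorem pvPreCand (edges : List (Int × Int)) (hpre : Pre_solution edges) :
    ∃ c : Int, pvCandB edges c = true ∧ c ∈ edges.map Prod.fst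
      ∧ ((PySem.Set.ofList (edges.map Prod.fst)).filter (pvCandB edges)) = [c]
      ∧ ∀ x : Int, pvCandB edges x = true → x = c := by
  obtain ⟨-, -, hone⟩ := hpre
  obtain ⟨c, hc⟩ := List.length_eq_one_iff.1 hone
  have hcf : c ∈ (PySem.Set.ofList (edges.map Prod.fst)).filter (pvCandB edges) := by
    rw [hc]; simp
  refine ⟨c, (List.mem_filter.1 hcf).2,
    (PySem.Set.mem_ofList _ _).1 (List.mem_filter.1 hcf).1, hc, ?_⟩
  intro x hx
  have hx2 : 0 < (edges.map Prod.fst).count x := by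
    have : 2 ≤ pvCountOut edges x := by
      simp only [pvCandB, Bool.and_eq_true, decide_eq_true_eq] at hx
      exact hx.1
    unfold pvCountOut at this
    omega
  have hxf : x ∈ (PySem.Set.ofList (edges.map Prod.fst)).filter (pvCandB edges) :=
    List.mem_filter.2 ⟨(PySem.Set.mem_ofList _ _).2 (List.count_pos_iff.1 hx2), hx⟩
  rw [hc] at hxf
  simpa using hxf

-- ---- the two per-start loop bodies, related ----
def pvRel (sA sB : PySem.Set Int × Int × Int × Int) : Prop :=
  (∀ y, y ∈ sA.1 ↔ y ∈ sB.1) ∧ sA.2 = sB.2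

theorem pvFoldRel (fA fB : (PySem.Set Int × Int × Int × Int) → Int →
      (PySem.Set Int × Int × Int × Int))
    (hstep : ∀ sA sB x, pvRel sA sB → pvRel (fA sA x) (fB sB x)) :
    ∀ (l : List Int) sA sB, pvRel sA sB → pvRel (l.foldl fA sA) (l.foldl fB sB) := by
  intro l
  induction l with
  | nil => intro sA sB h; exact h
  | cons x l ih => intro sA sB h; exact ih _ _ (hstep sA sB x h)

theorem pvStartRel (g : PySem.Dict Int (List Int)) (edges : List (Int × Int)) (node : Int)
    (HadjEq : ∀ a, g.getD a [] = (edges.filter (fun p => p.1 == a)).map (fun p => p.2))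
    (Hno : ∀ p ∈ edges, p.2 ≠ node) :
    ∀ (sA sB : PySem.Set Int × Int × Int × Int) (x : Int), pvRel sA sB →
      pvRel
        ((fun (st : PySem.Set Int × Int × Int × Int) x =>
          let r := solutionLoopA g node (PySem.Set.add st.1 x) [x] 1 0 false
          if r.2.2.2 = false then (r.1, st.2.1, st.2.2.1 + 1, st.2.2.2)
          else if r.2.1 = r.2.2.1 then (r.1, st.2.1 + 1, st.2.2.1, st.2.2.2)
          else if r.2.1 + 1 = r.2.2.1 then (r.1, st.2.1, st.2.2.1, st.2.2.2 + 1)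
          else (r.1, st.2.1, st.2.2.1, st.2.2.2)) sA x)
        ((fun (st : PySem.Set Int × Int × Int × Int) x =>
          let r := solutionLoopB edges node (PySem.Set.add st.1 x)
            (PySem.Set.add PySem.Set.empty x)
          let n : Int := r.2.length
          let e : Int := edges.foldl
            (fun s p => if p.1 ∈ r.2 ∧ p.2 ≠ node then s + 1 else s) 0
          let d := e - n + 1
          if d = 0 then (r.1, st.2.1, st.2.2.1 + 1, st.2.2.2)
          else if d = 1 then (r.1, st.2.1 + 1, st.2.2.1, st.2.2.2)
          else if d = 2 then (r.1, st.2.1, st.2.2.1, st.2.2.2 + 1)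
          else (r.1, st.2.1, st.2.2.1, st.2.2.2)) sB x) := by
  intro sA sB x hrel
  have Hadj : ∀ a b : Int, b ∈ g.getD a [] ↔ (a, b) ∈ edges := by
    intro a b
    rw [HadjEq a]
    constructor
    · intro hb
      obtain ⟨p, hp, hp2⟩ := List.mem_map.1 hb
      obtain ⟨hpe, hpa⟩ := List.mem_filter.1 hp
      have : p = (a, b) := by
        cases p
        simp only [beq_iff_eq] at hpa
        simp_all
      exact this ▸ hpe
    · intro hb
      exact List.mem_map.2 ⟨(a, b), List.mem_filter.2 ⟨hb, by simp⟩, rfl⟩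
  have H : ∀ a, node ∉ g.getD a [] := by
    intro a hmem
    exact Hno (a, node) ((Hadj a node).1 hmem) rfl
  have hS0 : ∀ y, y ∈ PySem.Set.add sA.1 x ↔ y ∈ PySem.Set.add sB.1 x := by
    intro y
    rw [PySem.Set.mem_add, PySem.Set.mem_add]
    exact or_congr (hrel.1 y) Iff.rfl
  -- A's start, characterised
  obtain ⟨ns, hA, hle, hnd, hdisj⟩ := pvLoopEq g node H
    ((pvUniv g \ (PySem.Set.add sA.1 x).toFinset).card)
    (PySem.Set.add sA.1 x) [x] 1 0 false le_rfl
  have hclA := pvReachA g node sA.1 x 1 0 false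
  rw [hA] at hclA
  simp only [] at hclA
  have hxS0 : x ∈ PySem.Set.add sA.1 x := by rw [PySem.Set.mem_add]; exact Or.inr rfl
  have hxns : x ∉ ns := fun h => hdisj x h hxS0
  have hcompA : ∀ y, y ∈ x :: ns ↔ pvCl g node (PySem.Set.add sA.1 x) x y := by
    intro y
    constructor
    · intro hy
      rcases List.mem_cons.1 hy with rfl | hy
      · exact pvCl.base
      · rcases (hclA y).1 (List.mem_append_right _ hy) with h | h
        · exact absurd h (hdisj y hy)
        · exact h
    · intro hy
      rcases (hclA y).2 (Or.inr hy) |> List.mem_append.1 with h | h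
      · rcases pvCl_not_s0 g node x hy with rfl | hns0
        · exact List.mem_cons_self
        · exact absurd h hns0
      · exact List.mem_cons_of_mem _ h
  have hndA : (x :: ns).Nodup := List.nodup_cons.2 ⟨hxns, hnd⟩
  -- B's start, characterised
  have hinitB : PySem.Set.add PySem.Set.empty x = [x] := rfl
  obtain ⟨m1, m2, m3, m4, m5⟩ := pvLoopB_char g (PySem.Set.add sA.1 x) x edges node Hadj
    (PySem.Set.add sB.1 x) (PySem.Set.add PySem.Set.empty x)
    (by rw [hinitB]
        intro y
        constructor
        · intro h
          exact Or.inl ((hS0 y).mpr h)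
        · rintro (h | h)
          · exact (hS0 y).mp h
          · simp only [List.mem_singleton] at h
            subst h
            rw [PySem.Set.mem_add _ _ _]
            exact Or.inr rfl)
    (by rw [hinitB]
        intro y hy
        simp only [List.mem_singleton] at hy
        subst hy
        exact pvCl.base)
    (by rw [hinitB]; simp)
  set r := solutionLoopB edges node (PySem.Set.add sB.1 x) (PySem.Set.add PySem.Set.empty x)
    with hrdef
  have hcompB : ∀ y, y ∈ r.2 ↔ y ∈ x :: ns := by
    intro y
    rw [hcompA y]
    constructor
    · exact m2 y
    · intro hy
      induction hy with
      | base => exact m4 x (by rw [hinitB]; simp)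
      | step ha hb hn hs ih =>
        have hin1 := m5 _ ((Hadj _ _).1 hb) ih hn
        rcases (m1 _).1 hin1 with h | h
        · exact absurd h hs
        · exact h
  have hperm : r.2.Perm (x :: ns) := (List.perm_ext_iff_of_nodup m3 hndA).2 hcompB
  have hlen : (r.2.length : Int) = (ns.length : Int) + 1 := by
    rw [hperm.length_eq]; simp
  -- the edge count of B's component
  have hcount : edges.foldl (fun s p => if p.1 ∈ r.2 ∧ p.2 ≠ node then s + 1 else s) 0
      = (pvDegSum g (x :: ns) : Int) := by
    rw [pvEfold]
    have h1 : edges.countP (fun p => decide (p.1 ∈ r.2) && decide (p.2 ≠ node))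
        = edges.countP (fun p => decide (p.1 ∈ r.2)) := by
      apply List.countP_congr
      intro p hp
      simp [Hno p hp]
    have h2 : edges.countP (fun p => decide (p.1 ∈ r.2))
        = ((r.2).map (fun a => edges.countP (fun p => p.1 == a))).sum :=
      pvCountP_memsum edges r.2 m3
    have h3 : ((r.2).map (fun a => edges.countP (fun p => p.1 == a))).sum
        = ((x :: ns).map (fun a => edges.countP (fun p => p.1 == a))).sum :=
      (hperm.map _).sum_eq
    have h4 : ∀ a : Int, edges.countP (fun p => p.1 == a) = (g.getD a []).length := by
      intro a
      rw [HadjEq a, List.length_map, ← List.countP_eq_length_filter]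
    have h5 : ((x :: ns).map (fun a => edges.countP (fun p => p.1 == a))).sum
        = pvDegSum g (x :: ns) := by
      unfold pvDegSum
      congr 1
      exact List.map_congr_left (fun a _ => h4 a)
    rw [h1, h2, h3, h5]
  -- the new mark sets agree
  have hseen' : ∀ y, y ∈ (PySem.Set.add sA.1 x) ++ ns ↔ y ∈ r.1 := by
    intro y
    rw [List.mem_append, m1 y]
    constructor
    · rintro (h | h)
      · exact Or.inl h
      · exact Or.inr ((hcompB y).2 (List.mem_cons_of_mem _ h))
    · rintro (h | h)
      · exact Or.inl h
      · rcases List.mem_cons.1 ((hcompB y).1 h) with rfl | h'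
        · exact Or.inl hxS0
        · exact Or.inr h'
  -- now compare the classifications
  have hD : pvDegSum g ([x] ++ ns) = pvDegSum g (x :: ns) := rfl
  simp only []
  rw [hA]
  set D := pvDegSum g (x :: ns) with hDdef
  set N := ns.length with hNdef
  have heB : (edges.foldl (fun s p => if p.1 ∈ r.2 ∧ p.2 ≠ node then s + 1 else s) 0)
      - (r.2.length : Int) + 1 = (D : Int) - (N : Int) := by
    rw [hcount, hlen]; ring
  rw [← hrdef] at *
  have hc1 : sA.2.1 = sB.2.1 := by rw [hrel.2]
  have hc2 : sA.2.2.1 = sB.2.2.1 := by rw [hrel.2]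
  have hc3 : sA.2.2.2 = sB.2.2.2 := by rw [hrel.2]
  by_cases k0 : D = N
  · have hdup : (false || decide (pvDegSum g ([x] ++ ns) ≠ ns.length)) = false := by
      rw [hD]
      simp only [decide_not, Bool.false_or, Bool.not_eq_false', decide_eq_true_eq]
      exact k0
    have hd0 : (edges.foldl (fun s p => if p.1 ∈ r.2 ∧ p.2 ≠ node then s + 1 else s) 0)
        - (r.2.length : Int) + 1 = 0 := by rw [heB, k0]; ring
    rw [if_pos hdup, if_pos hd0]
    exact ⟨hseen', by simp [hc1, hc2, hc3]⟩
  · have hdup : ¬ ((false || decide (pvDegSum g ([x] ++ ns) ≠ ns.length)) = false) := by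
      rw [hD]
      simp only [decide_not, Bool.false_or, Bool.not_eq_false', decide_eq_true_eq,
        Bool.not_eq_false]
      simpa using k0
    rw [if_neg hdup]
    by_cases k1 : D = N + 1
    · have hcnt : 1 + (ns.length : Int) = 0 + (pvDegSum g ([x] ++ ns) : Int) := by
        rw [hD, k1]; push_cast; ring
      have hd1 : (edges.foldl (fun s p => if p.1 ∈ r.2 ∧ p.2 ≠ node then s + 1 else s) 0)
          - (r.2.length : Int) + 1 = 1 := by rw [heB, k1]; push_cast; ring
      have hd0 : ¬ ((edges.foldl (fun s p => if p.1 ∈ r.2 ∧ p.2 ≠ node then s + 1 else s) 0)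
          - (r.2.length : Int) + 1 = 0) := by rw [heB, k1]; push_cast; omega
      rw [if_pos hcnt, if_neg hd0, if_pos hd1]
      exact ⟨hseen', by simp [hc1, hc2, hc3]⟩
    · have hcnt : ¬ (1 + (ns.length : Int) = 0 + (pvDegSum g ([x] ++ ns) : Int)) := by
        rw [hD]; push_cast; omega
      rw [if_neg hcnt]
      by_cases k2 : D = N + 2
      · have hcnt2 : 1 + (ns.length : Int) + 1 = 0 + (pvDegSum g ([x] ++ ns) : Int) := by
          rw [hD, k2]; push_cast; ring
        have hd2 : (edges.foldl (fun s p => if p.1 ∈ r.2 ∧ p.2 ≠ node then s + 1 else s) 0)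
            - (r.2.length : Int) + 1 = 2 := by rw [heB, k2]; push_cast; ring
        have hd0 : ¬ ((edges.foldl (fun s p => if p.1 ∈ r.2 ∧ p.2 ≠ node then s + 1 else s) 0)
            - (r.2.length : Int) + 1 = 0) := by rw [heB, k2]; push_cast; omega
        have hd1 : ¬ ((edges.foldl (fun s p => if p.1 ∈ r.2 ∧ p.2 ≠ node then s + 1 else s) 0)
            - (r.2.length : Int) + 1 = 1) := by rw [heB, k2]; push_cast; omega
        rw [if_pos hcnt2, if_neg hd0, if_neg hd1, if_pos hd2]
        exact ⟨hseen', by simp [hc1, hc2, hc3]⟩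
      · have hcnt2 : ¬ (1 + (ns.length : Int) + 1 = 0 + (pvDegSum g ([x] ++ ns) : Int)) := by
          rw [hD]; push_cast; omega
        have hd0 : ¬ ((edges.foldl (fun s p => if p.1 ∈ r.2 ∧ p.2 ≠ node then s + 1 else s) 0)
            - (r.2.length : Int) + 1 = 0) := by rw [heB]; push_cast; omega
        have hd1 : ¬ ((edges.foldl (fun s p => if p.1 ∈ r.2 ∧ p.2 ≠ node then s + 1 else s) 0)
            - (r.2.length : Int) + 1 = 1) := by rw [heB]; push_cast; omega
        have hd2 : ¬ ((edges.foldl (fun s p => if p.1 ∈ r.2 ∧ p.2 ≠ node then s + 1 else s) 0)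
            - (r.2.length : Int) + 1 = 2) := by rw [heB]; push_cast; omega
        rw [if_neg hcnt2, if_neg hd0, if_neg hd1, if_neg hd2]
        exact ⟨hseen', by simp [hc1, hc2, hc3]⟩

-- ---- the main equivalence ----
theorem pvMain (edges : List (Int × Int)) (hpre : Pre_solution edges) :
    solution edges = solution_alt edges := by
  obtain ⟨c, hcand, hcsrc, hcfilter, huniq⟩ := pvPreCand edges hpre
  have hcandOut : 2 ≤ pvCountOut edges c := by
    simp only [pvCandB, Bool.and_eq_true, decide_eq_true_eq] at hcand
    exact hcand.1
  have hcandIn : pvCountIn edges c = 0 := by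
    simp only [pvCandB, Bool.and_eq_true, decide_eq_true_eq] at hcand
    exact hcand.2
  unfold solution solution_alt
  simp only [pvBuildA_proj, pvBuildB_proj]
  -- the adjacency dictionary A builds
  set gd := edges.foldl
    (fun (d : PySem.Dict Int (List Int)) p => d.insert p.1 (d.getD p.1 [] ++ [p.2]))
    PySem.Dict.empty with hgd
  have HadjEq : ∀ a, gd.getD a [] = (edges.filter (fun p => p.1 == a)).map (fun p => p.2) := by
    intro a; rw [hgd, pvAdjEq]
  have Hno : ∀ p ∈ edges, p.2 ≠ c := by
    intro p hp hpc
    have : 0 < pvCountIn edges c := by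
      unfold pvCountIn
      rw [List.count_pos_iff]
      exact List.mem_map.2 ⟨p, hp, hpc⟩
    omega
  -- A's candidate scan returns (c, some c)
  have hselA : (edges.foldl (fun (n : PySem.Set Int) p =>
        PySem.Set.add (PySem.Set.add n p.1) p.2) PySem.Set.empty).foldl
      (fun (st : Int × Option Int) x =>
        if (edges.foldl (fun (d : PySem.Dict Int Int) p => d.insert p.2 (d.getD p.2 0 + 1))
              PySem.Dict.empty).getD x 0 = 0
            ∧ 2 ≤ (edges.foldl (fun (d : PySem.Dict Int Int) p => d.insert p.1 (d.getD p.1 0 + 1))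
              PySem.Dict.empty).getD x 0
        then (x, some x) else st) (0, none) = (c, some c) := by
    apply pvFoldLast
      (fun x => (edges.foldl (fun (d : PySem.Dict Int Int) p => d.insert p.2 (d.getD p.2 0 + 1))
            PySem.Dict.empty).getD x 0 = 0
          ∧ 2 ≤ (edges.foldl (fun (d : PySem.Dict Int Int) p => d.insert p.1 (d.getD p.1 0 + 1))
            PySem.Dict.empty).getD x 0)
      (fun x => (x, some x)) (c, some c)
    · refine ⟨c, ?_, ?_⟩
      · rw [pvNodesMem]
        obtain ⟨p, hp, hp1⟩ := List.mem_map.1 hcsrc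
        exact Or.inr ⟨p, hp, Or.inl hp1.symm⟩
      · rw [pvInDegEq, pvOutDegEq]
        constructor
        · exact_mod_cast congrArg (Nat.cast : Nat → Int) hcandIn
        · exact_mod_cast hcandOut
    · intro x hx hPx
      rw [pvInDegEq, pvOutDegEq] at hPx
      have hxcand : pvCandB edges x = true := by
        simp only [pvCandB, Bool.and_eq_true, decide_eq_true_eq]
        exact ⟨by exact_mod_cast hPx.2, by exact_mod_cast hPx.1⟩
      rw [huniq x hxcand]
  simp only [hselA]
  -- B's candidate list is exactly [c]
  have hselB : (((edges.foldl (fun (d : PySem.Dict Int Int) p =>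
        d.insert p.1 (d.getD p.1 0 + 1)) PySem.Dict.empty).items).filter
      (fun p => decide (2 ≤ p.2)
        && decide ((edges.foldl (fun (d : PySem.Dict Int Int) q =>
              d.insert q.2 (d.getD q.2 0 + 1)) PySem.Dict.empty).getD p.1 0 = 0))).map
      (fun p => p.1) = [c] := by
    rw [pvOutItems, List.filter_map]
    have hQ : ((fun p : Int × Int => decide (2 ≤ p.2)
          && decide ((edges.foldl (fun (d : PySem.Dict Int Int) q =>
              d.insert q.2 (d.getD q.2 0 + 1)) PySem.Dict.empty).getD p.1 0 = 0))
        ∘ (fun k => (k, (pvCountOut edges k : Int)))) = pvCandB edges := by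
      funext k
      simp only [Function.comp, pvCandB, pvInDegEq]
      by_cases h1 : 2 ≤ pvCountOut edges k <;> by_cases h2 : pvCountIn edges k = 0 <;>
        simp [h1, h2] <;> omega
    rw [hQ, hcfilter]
    rfl
  simp only [hselB]
  simp only [show PySem.List.pyGet? [c] (-1) = some c from rfl]
  -- both start folds now run related bodies over the same list
  have hsame : gd.getD c [] = (edges.filter (fun p => p.1 == c)).map (fun p => p.2) := HadjEq c
  rw [hsame]
  have hfin := pvFoldRel _ _ (fun sA sB x h => pvStartRel gd edges c HadjEq Hno sA sB x h)
    ((edges.filter (fun p => p.1 == c)).map (fun p => p.2))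
    (PySem.Set.empty, 0, 0, 0) (PySem.Set.empty, 0, 0, 0) ⟨fun y => Iff.rfl, rfl⟩
  obtain ⟨-, hcnt⟩ := hfin
  have h1 := congrArg (fun t : Int × Int × Int => t.1) hcnt
  have h2 := congrArg (fun t : Int × Int × Int => t.2.1) hcnt
  have h3 := congrArg (fun t : Int × Int × Int => t.2.2) hcnt
  simp only [] at h1 h2 h3
  rw [h1, h2, h3]

-- ===== VERDICT (by name: the statement is the Claim_ definition above) =====
theorem solution_spec : Claim_equal_solution := by
  intro edges _ hpre
  unfold Spec_solution
  exact pvMain edges hpre
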